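-- pv_equiv track=rewrite | github.com/nerdfunk-net/datenschleuder | backend/services/cert_manager/export.py | _extract_pem_blocks
-- ===== SOURCE A (Python) =====
-- def _extract_pem_blocks(pem_text: str) -> list:
--     """Split PEM text into a list of individual certificate blocks."""
--     marker = "-----BEGIN CERTIFICATE-----"
--     end_marker = "-----END CERTIFICATE-----"
--     blocks = []
--     start = 0
--     while True:
--         begin = pem_text.find(marker, start)
--         if begin == -1:
--             break
--         end = pem_text.find(end_marker, begin)
--         if end == -1:
--             break
--         end += len(end_marker)
--         blocks.append(pem_text[begin:end])
--         start = end
--     return blocks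
-- ===== SOURCE B (Python) =====
-- def _extract_pem_blocks(pem_text: str) -> list:
--     """Split PEM text into a list of individual certificate blocks."""
--     begin_marker = "-----BEGIN CERTIFICATE-----"
--     end_marker = "-----END CERTIFICATE-----"
--     blocks = []
--     rest = pem_text
--     while True:
--         _, found, tail = rest.partition(begin_marker)
--         if not found:
--             return blocks
--         # the block starts at the BEGIN marker; search the END marker from there
--         head, found, rest = (begin_marker + tail).partition(end_marker)
--         if not found:
--             return blocks
--         blocks.append(head + end_marker)
-- ===== Notes on version B (the rewrite author's own statement) =====
-- stated objective: idiomatic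
-- what changed: Replaces the index-based while-loop over find/slice positions with a scan that repeatedly str.partition()s the shrinking remainder of the text, keeping no indices at all.
import Mathlib
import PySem

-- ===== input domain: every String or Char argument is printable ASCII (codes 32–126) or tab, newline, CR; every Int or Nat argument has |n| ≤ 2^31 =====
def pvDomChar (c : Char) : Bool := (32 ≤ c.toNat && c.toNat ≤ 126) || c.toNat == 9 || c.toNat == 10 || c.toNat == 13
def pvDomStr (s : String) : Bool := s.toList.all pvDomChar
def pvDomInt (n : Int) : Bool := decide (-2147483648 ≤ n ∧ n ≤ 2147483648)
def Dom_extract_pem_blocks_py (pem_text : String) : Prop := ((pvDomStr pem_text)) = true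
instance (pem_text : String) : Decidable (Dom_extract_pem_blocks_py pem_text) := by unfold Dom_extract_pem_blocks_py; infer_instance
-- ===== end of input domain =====

-- B replaces A's index-based find/slice while-loop by repeated str.partition on the
-- shrinking remainder (no indices); the return values are proved equal below.

def pvBeginMarker : List Char := "-----BEGIN CERTIFICATE-----".toList
def pvEndMarker : List Char := "-----END CERTIFICATE-----".toList

-- ===== PORT A =====
-- loop of A: begin = pem_text.find(marker, start); if begin == -1: break;
-- end = pem_text.find(end_marker, begin); if end == -1: break;
-- end += 25; blocks.append(pem_text[begin:end]); start = end
def pvALoop (s : List Char) : Nat → List (List Char) → Nat → List (List Char)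
  | 0, blocks, _ => blocks  -- fuel only: never reached from the entry call (start grows every pass)
  | fuel + 1, blocks, start =>
    if PySem.Chars.findFrom s pvBeginMarker (start : Int) none = -1 then blocks
    else if PySem.Chars.findFrom s pvEndMarker
        (PySem.Chars.findFrom s pvBeginMarker (start : Int) none) none = -1 then blocks
    else
      pvALoop s fuel
        (blocks ++ [PySem.Chars.slice s (some (PySem.Chars.findFrom s pvBeginMarker (start : Int) none))
          (some (PySem.Chars.findFrom s pvEndMarker
            (PySem.Chars.findFrom s pvBeginMarker (start : Int) none) none + 25))])
        (PySem.Chars.findFrom s pvEndMarker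
          (PySem.Chars.findFrom s pvBeginMarker (start : Int) none) none + 25).toNat

def extract_pem_blocks_py (pem_text : String) : List String :=
  (pvALoop pem_text.toList (pem_text.toList.length + 1) [] 0).map String.ofList

-- ===== PORT B =====
-- hand port of str.partition(sep): split at the first occurrence of sep,
-- (s, "", "") when sep does not occur; exact for nonempty sep (ours are)
def pvPartition (s sep : List Char) : List Char × List Char × List Char :=
  if PySem.Chars.find s sep = -1 then (s, [], [])
  else (s.take (PySem.Chars.find s sep).toNat, sep,
        s.drop ((PySem.Chars.find s sep).toNat + sep.length))

-- loop of B: _, found, tail = rest.partition(begin_marker); if not found: return blocks;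
-- head, found, rest = (begin_marker + tail).partition(end_marker); if not found: return blocks;
-- blocks.append(head + end_marker)
def pvBLoop : Nat → List (List Char) → List Char → List (List Char)
  | 0, blocks, _ => blocks  -- fuel only: never reached from the entry call (rest shrinks every pass)
  | fuel + 1, blocks, rest =>
    if (pvPartition rest pvBeginMarker).2.1 = [] then blocks
    else if (pvPartition (pvBeginMarker ++ (pvPartition rest pvBeginMarker).2.2)
        pvEndMarker).2.1 = [] then blocks
    else
      pvBLoop fuel
        (blocks ++ [(pvPartition (pvBeginMarker ++ (pvPartition rest pvBeginMarker).2.2)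
          pvEndMarker).1 ++ pvEndMarker])
        (pvPartition (pvBeginMarker ++ (pvPartition rest pvBeginMarker).2.2) pvEndMarker).2.2

def extract_pem_blocks_py_alt (pem_text : String) : List String :=
  (pvBLoop (pem_text.toList.length + 1) [] pem_text.toList).map String.ofList

-- ===== PRECONDITION & SPEC =====
def Spec_extract_pem_blocks_py (pem_text : String) (out : List String) : Prop := out = extract_pem_blocks_py_alt pem_text
instance (pem_text : String) (out : List String) : Decidable (Spec_extract_pem_blocks_py pem_text out) := by unfold Spec_extract_pem_blocks_py; infer_instance

-- ===== CLAIM (what is proved, stated in full; the proofs are below) =====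
def Claim_equal_extract_pem_blocks_py : Prop := ∀ (pem_text : String), Dom_extract_pem_blocks_py pem_text → Spec_extract_pem_blocks_py pem_text (extract_pem_blocks_py pem_text)

-- ===== LEMMAS AND PROOFS =====

theorem pvFindFrom_le (s sub : List Char) (k : Nat)
    (h : PySem.Chars.findFrom s sub (k : Int) none ≠ -1) : k ≤ s.length := by
  by_contra hk
  apply h
  simp only [PySem.Chars.findFrom]
  split_ifs <;> omega

theorem pvPartition_eq (s sep : List Char) (h : PySem.Chars.find s sep ≠ -1) :
    pvPartition s sep = (s.take (PySem.Chars.find s sep).toNat, sep,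
      s.drop ((PySem.Chars.find s sep).toNat + sep.length)) := by
  simp [pvPartition, h]

-- the suffix starting at a found marker occurrence is the marker followed by the rest
theorem pvDrop_marker {s m : List Char} {k : Nat} (h : m <+: s.drop k) :
    s.drop k = m ++ s.drop (k + m.length) := by
  obtain ⟨t, ht⟩ := h
  have h2 : s.drop (k + m.length) = t := by
    rw [← List.drop_drop, ← ht, List.drop_left]
  rw [← ht, h2]

-- find (s.drop k) sub = -1 when k is past the end (drop is empty, sub nonempty)
theorem pvFind_drop_past (s sub : List Char) (k : Nat) (hk : ¬ k ≤ s.length) (hsub : sub ≠ []) :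
    PySem.Chars.find (s.drop k) sub = -1 := by
  rw [List.drop_eq_nil_of_le (by omega)]
  rw [PySem.Chars.find_eq_neg_one_iff]
  simp [List.infix_nil, hsub]

-- findFrom on an in-range Nat start, phrased through find on the suffix
theorem pvFindFrom_char (s sub : List Char) (k : Nat) (hk : k ≤ s.length) :
    (PySem.Chars.findFrom s sub (k : Int) none = -1 ↔ PySem.Chars.find (s.drop k) sub = -1) ∧
    (PySem.Chars.find (s.drop k) sub ≠ -1 →
      PySem.Chars.findFrom s sub (k : Int) none = k + PySem.Chars.find (s.drop k) sub) := by
  rw [PySem.Chars.findFrom_natCast s sub k hk]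
  by_cases hf : PySem.Chars.find (s.drop k) sub = -1
  · simp [hf]
  · have h0 : 0 ≤ PySem.Chars.find (s.drop k) sub :=
      (PySem.Chars.find_nonneg_iff _ sub).2 ((PySem.Chars.find_ne_neg_one_iff _ sub).1 hf)
    rw [if_neg hf]
    constructor
    · constructor
      · intro h; omega
      · intro h; exact absurd h hf
    · intro _; rfl

theorem pvBLoop_stop1 (fuel : Nat) (blocks : List (List Char)) (rest : List Char)
    (h : PySem.Chars.find rest pvBeginMarker = -1) : pvBLoop (fuel + 1) blocks rest = blocks := by
  rw [pvBLoop]; simp [pvPartition, h]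

theorem pvBLoop_stop2 (fuel : Nat) (blocks : List (List Char)) (rest : List Char)
    (h1 : PySem.Chars.find rest pvBeginMarker ≠ -1)
    (h2 : PySem.Chars.find (pvBeginMarker ++ rest.drop ((PySem.Chars.find rest pvBeginMarker).toNat + pvBeginMarker.length)) pvEndMarker = -1) :
    pvBLoop (fuel + 1) blocks rest = blocks := by
  rw [pvBLoop, pvPartition_eq _ _ h1]
  simp [pvPartition, h2]

theorem pvBLoop_go (fuel : Nat) (blocks : List (List Char)) (rest : List Char)
    (h1 : PySem.Chars.find rest pvBeginMarker ≠ -1)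
    (h2 : PySem.Chars.find (pvBeginMarker ++ rest.drop ((PySem.Chars.find rest pvBeginMarker).toNat + pvBeginMarker.length)) pvEndMarker ≠ -1) :
    pvBLoop (fuel + 1) blocks rest = pvBLoop fuel
      (blocks ++ [(pvBeginMarker ++ rest.drop ((PySem.Chars.find rest pvBeginMarker).toNat + pvBeginMarker.length)).take
          (PySem.Chars.find (pvBeginMarker ++ rest.drop ((PySem.Chars.find rest pvBeginMarker).toNat + pvBeginMarker.length)) pvEndMarker).toNat ++ pvEndMarker])
      ((pvBeginMarker ++ rest.drop ((PySem.Chars.find rest pvBeginMarker).toNat + pvBeginMarker.length)).drop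
          ((PySem.Chars.find (pvBeginMarker ++ rest.drop ((PySem.Chars.find rest pvBeginMarker).toNat + pvBeginMarker.length)) pvEndMarker).toNat + pvEndMarker.length)) := by
  conv_lhs => rw [pvBLoop]
  rw [pvPartition_eq _ _ h1]
  simp only
  rw [pvPartition_eq _ _ h2]
  rw [if_neg (show ¬pvBeginMarker = [] by decide), if_neg (show ¬pvEndMarker = [] by decide)]

theorem pvLoop_eq (s : List Char) (fuel : Nat) :
    ∀ (start : Nat) (blocks : List (List Char)), s.length + 1 ≤ fuel + start →
    pvALoop s fuel blocks start = pvBLoop fuel blocks (s.drop start) := by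
  induction fuel with
  | zero => intro start blocks hfs; rfl
  | succ fuel ih =>
    intro start blocks hfs
    by_cases hb : PySem.Chars.findFrom s pvBeginMarker (start : Int) none = -1
    · -- A stops: no BEGIN marker from start; B's first partition finds nothing
      rw [pvALoop, if_pos hb]
      by_cases hsl : start ≤ s.length
      · exact (pvBLoop_stop1 _ _ _ ((pvFindFrom_char s pvBeginMarker start hsl).1.1 hb)).symm
      · exact (pvBLoop_stop1 _ _ _ (pvFind_drop_past s pvBeginMarker start hsl (by decide))).symm
    · have hsl : start ≤ s.length := pvFindFrom_le s pvBeginMarker start hb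
      have hf1 : PySem.Chars.find (s.drop start) pvBeginMarker ≠ -1 := by
        intro hf; exact hb ((pvFindFrom_char s pvBeginMarker start hsl).1.2 hf)
      have h0 : 0 ≤ PySem.Chars.find (s.drop start) pvBeginMarker :=
        (PySem.Chars.find_nonneg_iff _ _).2 ((PySem.Chars.find_ne_neg_one_iff _ _).1 hf1)
      have hbeq := (pvFindFrom_char s pvBeginMarker start hsl).2 hf1
      obtain ⟨hp1, -⟩ := PySem.Chars.find_spec h0
      rw [List.drop_drop] at hp1
      have hchunk := pvDrop_marker hp1
      have hb' : (start + (PySem.Chars.find (s.drop start) pvBeginMarker).toNat) ≤ s.length := by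
        have := hp1.length_le
        have : (0:Nat) < pvBeginMarker.length := by decide
        simp only [List.length_drop] at *; omega
      have htail : List.drop ((PySem.Chars.find (s.drop start) pvBeginMarker).toNat + pvBeginMarker.length) (s.drop start)
          = s.drop (start + (PySem.Chars.find (s.drop start) pvBeginMarker).toNat + pvBeginMarker.length) := by
        rw [List.drop_drop, Nat.add_assoc]
      have hbn : PySem.Chars.findFrom s pvBeginMarker (start : Int) none =
          ((start + (PySem.Chars.find (s.drop start) pvBeginMarker).toNat : Nat) : Int) := by
        rw [hbeq]; omega
      by_cases he : PySem.Chars.findFrom s pvEndMarker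
          ((start + (PySem.Chars.find (s.drop start) pvBeginMarker).toNat : Nat) : Int) none = -1
      · -- A stops after a BEGIN: no END marker from there; B's second partition finds nothing
        have hf2 : PySem.Chars.find (s.drop (start + (PySem.Chars.find (s.drop start) pvBeginMarker).toNat)) pvEndMarker = -1 :=
          (pvFindFrom_char s pvEndMarker _ hb').1.1 he
        rw [pvALoop, if_neg hb, hbn, if_pos he]
        refine (pvBLoop_stop2 _ _ _ hf1 ?_).symm
        rw [htail, ← hchunk]
        exact hf2
      · have hf2 : PySem.Chars.find (s.drop (start + (PySem.Chars.find (s.drop start) pvBeginMarker).toNat)) pvEndMarker ≠ -1 := by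
          intro hf; exact he ((pvFindFrom_char s pvEndMarker _ hb').1.2 hf)
        have h2 : 0 ≤ PySem.Chars.find (s.drop (start + (PySem.Chars.find (s.drop start) pvBeginMarker).toNat)) pvEndMarker :=
          (PySem.Chars.find_nonneg_iff _ _).2 ((PySem.Chars.find_ne_neg_one_iff _ _).1 hf2)
        have heeq := (pvFindFrom_char s pvEndMarker _ hb').2 hf2
        obtain ⟨hp2, -⟩ := PySem.Chars.find_spec h2
        have hend := pvDrop_marker hp2
        rw [pvALoop, if_neg hb, hbn, if_neg he]
        rw [ih ((PySem.Chars.findFrom s pvEndMarker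
            ((start + (PySem.Chars.find (s.drop start) pvBeginMarker).toNat : Nat) : Int) none + 25).toNat) _ (by rw [heeq]; omega)]
        have hstep := pvBLoop_go fuel blocks (s.drop start) hf1 (by rw [htail, ← hchunk]; exact hf2)
        rw [htail, ← hchunk] at hstep
        rw [hstep]
        congr 1
        · -- the appended block: A's slice equals B's head ++ end marker
          congr 2
          rw [heeq,
            show (((start + (PySem.Chars.find (s.drop start) pvBeginMarker).toNat : Nat) : Int) +
                PySem.Chars.find (s.drop (start + (PySem.Chars.find (s.drop start) pvBeginMarker).toNat)) pvEndMarker + 25) =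
              (((start + (PySem.Chars.find (s.drop start) pvBeginMarker).toNat) +
                ((PySem.Chars.find (s.drop (start + (PySem.Chars.find (s.drop start) pvBeginMarker).toNat)) pvEndMarker).toNat + 25) : Nat) : Int) from by omega,
            PySem.Chars.slice_eq_listSlice, PySem.List.slice_natCast,
            show (start + (PySem.Chars.find (s.drop start) pvBeginMarker).toNat) +
                ((PySem.Chars.find (s.drop (start + (PySem.Chars.find (s.drop start) pvBeginMarker).toNat)) pvEndMarker).toNat + 25) -
                (start + (PySem.Chars.find (s.drop start) pvBeginMarker).toNat) =
              (PySem.Chars.find (s.drop (start + (PySem.Chars.find (s.drop start) pvBeginMarker).toNat)) pvEndMarker).toNat + 25 from by omega,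
            List.take_add]
          congr 1
          rw [hend, show (25:Nat) = pvEndMarker.length from by decide, List.take_left]
        · -- the new remainder
          rw [heeq, List.drop_drop]
          congr 1
          have : pvEndMarker.length = 25 := by decide
          omega

-- ===== VERDICT (by name: the statement is the Claim_ definition above) =====
theorem extract_pem_blocks_py_spec : Claim_equal_extract_pem_blocks_py := by
  intro pem_text _
  unfold Spec_extract_pem_blocks_py extract_pem_blocks_py extract_pem_blocks_py_alt
  rw [pvLoop_eq pem_text.toList (pem_text.toList.length + 1) 0 [] (by omega), List.drop_zero]
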